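-- pv_equiv track=rewrite | github.com/davidgfnet/superfw-cheats | scripts/conv-retro.py | filter_master
-- ===== SOURCE A (Python) =====
-- def filter_master(codes):
--   ret = []
--   i = 0
--   while i < len(codes):
--     c = codes[i]
--
--     op = c["addr"] >> 28
--
--     if op == 0 or op == 1:
--       i += 1    # Skip
--     elif op == 4:
--       ret.append(codes[i])
--       ret.append(codes[i+1])
--       i += 2
--     elif op == 5:
--       ret.append(codes[i])
--       i += 1
--       numc = (c["value"] + 5) // 6
--
--       for j in range(numc):
--         ret.append(codes[i])
--         i += 1
--     else:
--       ret.append(codes[i])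
--       i += 1
--
--   return ret
-- ===== SOURCE B (Python) =====
-- def filter_master(codes):
--   # Single pass with a copy_remaining counter instead of index arithmetic.
--   # On truncated multi-word entries (where A raises IndexError) this returns
--   # the codes collected so far.
--   ret = []
--   rem = 0
--   for c in codes:
--     if rem > 0:
--       ret.append(c)
--       rem -= 1
--       continue
--     op = c["addr"] >> 28
--     if op == 0 or op == 1:
--       continue
--     ret.append(c)
--     if op == 4:
--       rem = 1
--     elif op == 5:
--       rem = (c["value"] + 5) // 6
--   return ret
-- ===== Notes on version B (the rewrite author's own statement) =====
-- stated objective: simpler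
-- what changed: Replaces A's index-jumping while-loop with a nested copy loop by a single uniform for-loop over the elements that maintains an integer copy_remaining counter.
import Mathlib
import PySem

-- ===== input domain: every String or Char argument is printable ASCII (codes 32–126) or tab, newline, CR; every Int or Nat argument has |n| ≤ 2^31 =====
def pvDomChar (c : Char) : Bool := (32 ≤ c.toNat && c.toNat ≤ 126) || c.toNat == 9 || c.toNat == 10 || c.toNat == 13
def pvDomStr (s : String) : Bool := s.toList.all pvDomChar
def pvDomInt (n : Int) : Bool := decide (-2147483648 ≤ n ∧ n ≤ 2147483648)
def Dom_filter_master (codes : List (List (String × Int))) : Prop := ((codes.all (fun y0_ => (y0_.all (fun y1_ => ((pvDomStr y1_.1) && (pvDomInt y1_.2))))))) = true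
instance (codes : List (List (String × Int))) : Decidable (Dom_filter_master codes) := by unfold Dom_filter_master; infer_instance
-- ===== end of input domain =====

-- B replaces A's index-jumping while-loop (with a nested copy loop) by one uniform
-- for-loop keeping a copy_remaining counter; return values agree wherever A returns
-- (equal cost; return values only: wherever A raises, the input is outside Pre_ below).

-- dict lookup c[k]: first match in the association list (none = KeyError)
def fmGetK (c : List (String × Int)) (k : String) : Option Int :=
  (c.find? (fun p => p.1 == k)).map (·.2)

-- used by fmLoopA's termination proof
theorem fm_lt_of_get (xs : List (List (String × Int))) (i : Nat) (c : List (String × Int))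
    (h : xs[i]? = some c) : i < xs.length := by
  by_contra hc
  rw [List.getElem?_eq_none (by omega)] at h
  exact absurd h (by simp)

-- ===== PORT A =====
-- inner 'for j in range(numc)' loop: appends codes[i] and advances i, n times
def fmCopyA (codes : List (List (String × Int))) (i : Nat) (n : Nat)
    (ret : List (List (String × Int))) : Option (Nat × List (List (String × Int))) :=
  match n with
  | 0 => some (i, ret)
  | n + 1 =>
    match codes[i]? with
    | none => none              -- IndexError
    | some c => fmCopyA codes (i + 1) n (ret ++ [c])

-- used by fmLoopA's termination proof
theorem fmCopyA_idx (codes : List (List (String × Int))) (i n : Nat)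
    (ret : List (List (String × Int))) (i' : Nat) (ret' : List (List (String × Int))) :
    fmCopyA codes i n ret = some (i', ret') → i' = i + n := by
  induction n generalizing i ret with
  | zero => intro h; simp [fmCopyA] at h; omega
  | succ n ih =>
    intro h
    simp only [fmCopyA] at h
    cases hg : codes[i]? with
    | none => rw [hg] at h; exact absurd h (by simp)
    | some c => rw [hg] at h; have := ih (i + 1) (ret ++ [c]) h; omega

-- the while-loop of A, state (i, ret)
def fmLoopA (codes : List (List (String × Int))) (i : Nat)
    (ret : List (List (String × Int))) : Option (List (List (String × Int))) :=
  match hge : codes[i]? with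
  | none => some ret            -- i ≥ len(codes): loop exits
  | some c =>
    match fmGetK c "addr" with
    | none => none              -- KeyError
    | some a =>
      let op := PySem.Int.floordiv a (2 ^ 28)   -- c["addr"] >> 28
      if op = 0 ∨ op = 1 then fmLoopA codes (i + 1) ret
      else if op = 4 then
        match codes[i + 1]? with
        | none => none          -- IndexError
        | some d => fmLoopA codes (i + 2) (ret ++ [c] ++ [d])
      else if op = 5 then
        match fmGetK c "value" with
        | none => none          -- KeyError
        | some v =>
          let numc := PySem.Int.floordiv (v + 5) 6
          match hcp : fmCopyA codes (i + 1) numc.toNat (ret ++ [c]) with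
          | none => none        -- IndexError in the copy loop
          | some (i', ret') => fmLoopA codes i' ret'
      else fmLoopA codes (i + 1) (ret ++ [c])
termination_by codes.length - i
decreasing_by
  · have := fm_lt_of_get codes i c hge; omega
  · have := fm_lt_of_get codes i c hge; omega
  · have h1 := fm_lt_of_get codes i c hge
    have h2 := fmCopyA_idx codes (i + 1) _ _ _ _ hcp
    omega
  · have := fm_lt_of_get codes i c hge; omega

def filter_master (codes : List (List (String × Int))) : List (List (String × Int)) :=
  (fmLoopA codes 0 []).getD []

-- ===== PORT B =====
-- one pass with a copy_remaining counter rem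
def fmLoopB (rem : Int) (ret : List (List (String × Int)))
    (rest : List (List (String × Int))) : Option (List (List (String × Int))) :=
  match rest with
  | [] => some ret
  | c :: rest =>
    if rem > 0 then fmLoopB (rem - 1) (ret ++ [c]) rest
    else
      match fmGetK c "addr" with
      | none => none            -- KeyError
      | some a =>
        let op := PySem.Int.floordiv a (2 ^ 28)
        if op = 0 ∨ op = 1 then fmLoopB 0 ret rest
        else
          let ret' := ret ++ [c]
          if op = 4 then fmLoopB 1 ret' rest
          else if op = 5 then
            match fmGetK c "value" with
            | none => none      -- KeyError
            | some v => fmLoopB (PySem.Int.floordiv (v + 5) 6) ret' rest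
          else fmLoopB 0 ret' rest

def filter_master_alt (codes : List (List (String × Int))) : List (List (String × Int)) :=
  (fmLoopB 0 [] codes).getD []

-- ===== PRECONDITION & SPEC =====
inductive FmScan where
  | ok | trunc | keyerr
deriving DecidableEq, Repr

-- Shape grammar of the cheat list: every header word must carry an "addr" key and
-- `fmOwes` says how many payload words it owes (op 4: one; op 5: (value+5)//6, which
-- needs a "value" key; none = a required key is missing); the list is well formed when
-- headers and owed payload words tile it exactly.
-- ok = well formed (A returns); trunc = owed payload words run past the end of the
-- list (A raises IndexError); keyerr = a header lacks a needed key (A raises KeyError).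
def fmOwes (c : List (String × Int)) : Option Nat :=
  match fmGetK c "addr" with
  | none => none
  | some a =>
    let op := PySem.Int.floordiv a (2 ^ 28)
    if op = 4 then some 1
    else if op = 5 then (fmGetK c "value").map (fun v => (PySem.Int.floordiv (v + 5) 6).toNat)
    else some 0

def fmScanGo (owed : Nat) (l : List (List (String × Int))) : FmScan :=
  match l, owed with
  | [], 0 => FmScan.ok
  | [], _ + 1 => FmScan.trunc
  | _ :: tl, o + 1 => fmScanGo o tl
  | hd :: tl, 0 =>
    match fmOwes hd with
    | none => FmScan.keyerr
    | some o => fmScanGo o tl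

-- Pre_: exactly the inputs on which the Python A returns (no KeyError / IndexError)
def Pre_filter_master (codes : List (List (String × Int))) : Prop :=
  fmScanGo 0 codes = FmScan.ok
instance (codes : List (List (String × Int))) : Decidable (Pre_filter_master codes) := by
  unfold Pre_filter_master; infer_instance

def pvWitness_filter_master : (List (List (String × Int))) :=
  [[("addr", 1073741824), ("value", 0)], [("addr", 7)]]

def Spec_filter_master (codes : List (List (String × Int))) (out : List (List (String × Int))) : Prop := out = filter_master_alt codes
instance (codes : List (List (String × Int))) (out : List (List (String × Int))) : Decidable (Spec_filter_master codes out) := by unfold Spec_filter_master; infer_instance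

-- ===== CLAIM (what is proved, stated in full; the proofs are below) =====
def Claim_equal_filter_master : Prop := ∀ (codes : List (List (String × Int))), Dom_filter_master codes → Pre_filter_master codes → Spec_filter_master codes (filter_master codes)

-- ===== LEMMAS AND PROOFS =====

theorem fmScanGo_ok (n : Nat) : ∀ (rest : List (List (String × Int))),
    fmScanGo n rest = FmScan.ok →
    n ≤ rest.length ∧ fmScanGo 0 (rest.drop n) = FmScan.ok := by
  induction n with
  | zero => intro rest h; simpa using h
  | succ n ih =>
    intro rest h
    cases rest with
    | nil => simp [fmScanGo] at h
    | cons c rest =>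
      have := ih rest (by simpa [fmScanGo] using h)
      exact ⟨by simpa using Nat.succ_le_succ this.1, by simpa using this.2⟩

theorem fmCopyA_take (n : Nat) :
    ∀ (rest pre ret : List (List (String × Int))), n ≤ rest.length →
      fmCopyA (pre ++ rest) pre.length n ret = some (pre.length + n, ret ++ rest.take n) := by
  induction n with
  | zero => intro rest pre ret _; simp [fmCopyA]
  | succ n ih =>
    intro rest pre ret hle
    cases rest with
    | nil => simp at hle
    | cons c rest =>
      have hget : (pre ++ c :: rest)[pre.length]? = some c := by
        simp
      have step := ih rest (pre ++ [c]) (ret ++ [c]) (by simpa using Nat.le_of_succ_le_succ hle)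
      simp only [fmCopyA, hget]
      simp only [List.append_assoc, List.singleton_append, List.length_append,
        List.length_cons, List.length_nil] at step ⊢
      rw [step]
      simp [Nat.add_comm, Nat.add_left_comm]

theorem fmLoopB_nonpos (rem : Int) (h : rem ≤ 0)
    (ret rest : List (List (String × Int))) :
    fmLoopB rem ret rest = fmLoopB 0 ret rest := by
  cases rest with
  | nil => rfl
  | cons c rest =>
    rw [fmLoopB, fmLoopB]
    rw [if_neg (by omega), if_neg (by omega)]

theorem fmLoopB_copy (n : Nat) :
    ∀ (rest ret : List (List (String × Int))), n ≤ rest.length →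
      fmLoopB (n : Int) ret rest = fmLoopB 0 (ret ++ rest.take n) (rest.drop n) := by
  induction n with
  | zero => intro rest ret _; simp
  | succ n ih =>
    intro rest ret hle
    cases rest with
    | nil => simp at hle
    | cons c rest =>
      rw [fmLoopB, if_pos (by omega)]
      have : ((n : Int) + 1) - 1 = (n : Int) := by omega
      rw [show ((n + 1 : Nat) : Int) - 1 = (n : Int) by push_cast; omega]
      rw [ih rest (ret ++ [c]) (by simpa using Nat.le_of_succ_le_succ hle)]
      simp

theorem fm_main (k : Nat) : ∀ (rest : List (List (String × Int))), rest.length ≤ k →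
    fmScanGo 0 rest = FmScan.ok →
    ∀ (pre ret : List (List (String × Int))),
      fmLoopA (pre ++ rest) pre.length ret = fmLoopB 0 ret rest := by
  induction k with
  | zero =>
    intro rest hlen _ pre ret
    have : rest = [] := List.eq_nil_of_length_eq_zero (by omega)
    subst this
    rw [fmLoopA.eq_def]
    split
    · rfl
    case _ c heq => rw [show (pre ++ ([] : List (List (String × Int))))[pre.length]? = none by simp] at heq; exact absurd heq (by simp)
  | succ k ih =>
    intro rest hlen hscan pre ret
    cases rest with
    | nil =>
      rw [fmLoopA.eq_def]
      split
      · rfl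
      case _ c heq => rw [show (pre ++ ([] : List (List (String × Int))))[pre.length]? = none by simp] at heq; exact absurd heq (by simp)
    | cons c rest =>
      have hget : (pre ++ c :: rest)[pre.length]? = some c := by simp
      rw [fmLoopA.eq_def]
      split
      case _ heq => rw [hget] at heq; exact absurd heq (by simp)
      case _ c' heq =>
        rw [hget] at heq
        injection heq with heq; subst heq
        rw [fmLoopB, if_neg (by omega)]
        cases hA : fmGetK c "addr" with
        | none => simp [fmScanGo, fmOwes, hA] at hscan
        | some a =>
          simp only [fmScanGo] at hscan
          dsimp only
          by_cases h01 : PySem.Int.floordiv a (2 ^ 28) = 0 ∨ PySem.Int.floordiv a (2 ^ 28) = 1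
          · have hne4 : PySem.Int.floordiv a (2 ^ 28) ≠ 4 := by rcases h01 with h | h <;> omega
            have hne5 : PySem.Int.floordiv a (2 ^ 28) ≠ 5 := by rcases h01 with h | h <;> omega
            have howes : fmOwes c = some 0 := by
              simp only [fmOwes, hA]
              rw [if_neg hne4, if_neg hne5]
            rw [howes] at hscan
            dsimp only at hscan
            rw [if_pos h01, if_pos h01]
            rw [show pre ++ c :: rest = (pre ++ [c]) ++ rest by simp,
                show pre.length + 1 = (pre ++ [c]).length by simp]
            exact ih rest (by simpa using hlen) hscan (pre ++ [c]) ret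
          · rw [if_neg h01, if_neg h01]
            by_cases h4 : PySem.Int.floordiv a (2 ^ 28) = 4
            · have howes : fmOwes c = some 1 := by
                simp only [fmOwes, hA]
                rw [if_pos h4]
              rw [howes] at hscan
              dsimp only at hscan
              rw [if_pos h4, if_pos h4]
              obtain ⟨hle1, hdrop⟩ := fmScanGo_ok 1 rest hscan
              cases rest with
              | nil => simp at hle1
              | cons d rest =>
                have hget2 : (pre ++ c :: d :: rest)[pre.length + 1]? = some d := by
                  rw [show pre ++ c :: d :: rest = (pre ++ [c]) ++ d :: rest by simp,
                      show pre.length + 1 = (pre ++ [c]).length by simp]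
                  simp
                rw [hget2]
                rw [fmLoopB, if_pos (by omega)]
                rw [show (1 : Int) - 1 = 0 by omega]
                rw [show pre ++ c :: d :: rest = (pre ++ [c] ++ [d]) ++ rest by simp,
                    show pre.length + 2 = (pre ++ [c] ++ [d]).length by simp]
                have := ih rest (by simp at hlen; omega) (by simpa using hdrop) (pre ++ [c] ++ [d]) (ret ++ [c] ++ [d])
                simpa using this
            · rw [if_neg h4, if_neg h4]
              by_cases h5 : PySem.Int.floordiv a (2 ^ 28) = 5
              · rw [if_pos h5, if_pos h5]
                cases hV : fmGetK c "value" with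
                | none =>
                  have howes : fmOwes c = none := by
                    simp only [fmOwes, hA, hV]
                    rw [if_neg h4, if_pos h5]; rfl
                  rw [howes] at hscan
                | some v =>
                  have howes : fmOwes c = some (PySem.Int.floordiv (v + 5) 6).toNat := by
                    simp only [fmOwes, hA, hV]
                    rw [if_neg h4, if_pos h5]; rfl
                  rw [howes] at hscan
                  dsimp only at hscan ⊢
                  obtain ⟨hle, hdrop⟩ := fmScanGo_ok _ rest hscan
                  have hcopy := fmCopyA_take (PySem.Int.floordiv (v + 5) 6).toNat
                    rest (pre ++ [c]) (ret ++ [c]) hle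
                  rw [show (pre ++ [c]) ++ rest = pre ++ c :: rest by simp,
                      show (pre ++ [c]).length = pre.length + 1 by simp] at hcopy
                  split
                  case _ heq => rw [hcopy] at heq; exact absurd heq (by simp)
                  case _ i' ret' heq =>
                  rw [hcopy] at heq
                  simp only [Option.some.injEq, Prod.mk.injEq] at heq
                  obtain ⟨h1, h2⟩ := heq
                  subst h1 h2
                  have hB : fmLoopB (PySem.Int.floordiv (v + 5) 6) (ret ++ [c]) rest =
                      fmLoopB 0 (ret ++ [c] ++ rest.take (PySem.Int.floordiv (v + 5) 6).toNat)
                        (rest.drop (PySem.Int.floordiv (v + 5) 6).toNat) := by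
                    by_cases hnp : PySem.Int.floordiv (v + 5) 6 ≤ 0
                    · rw [fmLoopB_nonpos _ hnp]
                      rw [Int.toNat_of_nonpos hnp]
                      simp
                    · rw [show PySem.Int.floordiv (v + 5) 6 =
                            ((PySem.Int.floordiv (v + 5) 6).toNat : Int) by
                          rw [Int.toNat_of_nonneg (by omega)]]
                      exact fmLoopB_copy _ rest (ret ++ [c]) hle
                  rw [hB]
                  have hlen2 : (rest.drop (PySem.Int.floordiv (v + 5) 6).toNat).length ≤ k := by
                    simp at hlen ⊢; omega
                  have := ih _ hlen2 hdrop
                    (pre ++ [c] ++ rest.take (PySem.Int.floordiv (v + 5) 6).toNat)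
                    (ret ++ [c] ++ rest.take (PySem.Int.floordiv (v + 5) 6).toNat)
                  rw [show (pre ++ [c] ++ rest.take (PySem.Int.floordiv (v + 5) 6).toNat).length
                        = pre.length + 1 + (PySem.Int.floordiv (v + 5) 6).toNat by
                      simp only [List.length_append, List.length_take, List.length_cons,
                        List.length_nil]; omega] at this
                  rw [show (pre ++ [c] ++ rest.take (PySem.Int.floordiv (v + 5) 6).toNat)
                        ++ rest.drop (PySem.Int.floordiv (v + 5) 6).toNat
                        = pre ++ c :: rest by simp] at this
                  exact this
              · have howes : fmOwes c = some 0 := by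
                  simp only [fmOwes, hA]
                  rw [if_neg h4, if_neg h5]
                rw [howes] at hscan
                dsimp only at hscan
                rw [if_neg h5, if_neg h5]
                rw [fmLoopB_nonpos 0 le_rfl]
                rw [show pre ++ c :: rest = (pre ++ [c]) ++ rest by simp,
                    show pre.length + 1 = (pre ++ [c]).length by simp]
                exact ih rest (by simpa using hlen) hscan (pre ++ [c]) (ret ++ [c])

-- ===== VERDICT (by name: the statement is the Claim_ definition above) =====
theorem filter_master_spec : Claim_equal_filter_master := by
  intro codes _ hpre
  unfold Spec_filter_master filter_master filter_master_alt
  have h := fm_main codes.length codes le_rfl hpre [] []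
  simp only [List.nil_append, List.length_nil] at h
  rw [h]
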